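-- pv_equiv track=rewrite | github.com/goelmedha1/Leetcode | tiktok2.py | maximizeCreatorSupport
-- ===== SOURCE A (Python) =====
-- def maximizeCreatorSupport(impactValue):
--     # Separate positives, zeros, and negatives
--     positives = []
--     negatives = []
--     zeros_count = 0
--
--     for v in impactValue:
--         if v > 0:
--             positives.append(v)
--         elif v < 0:
--             negatives.append(v)
--         else:
--             zeros_count += 1  # v == 0
--
--     # 1) Sum all positives
--     net_impact = sum(positives)
--     count = len(positives)  # all positive items are included
--
--     # 2) Add all zeros (they won't break positivity as long as net_impact > 0)
--     if net_impact > 0: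
--         count += zeros_count  # each zero keeps net_impact unchanged
--
--     # 3) Sort negatives by ascending absolute value, then try to include them greedily
--     negatives.sort(key=lambda x: abs(x))
--
--     for neg in negatives:
--         if net_impact + neg > 0:  # still remains positive
--             net_impact += neg
--             count += 1
--         else:
--             # If this negative is too large (in absolute value),
--             # none of the larger (more negative) ones will fit either
--             # but let's continue just in case there's a less negative item (in a different scenario).
--             # Actually, we've sorted ascending, so the next items will be worse.
--             # We can break here for efficiency, but it won't affect correctness.
--             break
--
--     return count
-- ===== SOURCE B (Python) =====
-- def maximizeCreatorSupport(impactValue):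
--     # One pass: running positive sum, count of positives, zero count, negatives list.
--     net = 0
--     included = 0
--     zeros = 0
--     negatives = []
--     for v in impactValue:
--         if v > 0:
--             net += v
--             included += 1
--         elif v < 0:
--             negatives.append(v)
--         else:
--             zeros += 1
--     if net > 0:
--         included += zeros
--     # Least-magnitude negatives first = descending value order.
--     negatives.sort(reverse=True)
--     # Prefix sums of the sorted negatives; net + prefix[i] is strictly decreasing,
--     # so the number of includable negatives is found by binary search instead of a greedy scan.
--     prefix = []
--     running = 0
--     for v in negatives:
--         running += v
--         prefix.append(running)
--     lo, hi = 0, len(prefix)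
--     while lo < hi:
--         mid = (lo + hi) // 2
--         if net + prefix[mid] > 0:
--             lo = mid + 1
--         else:
--             hi = mid
--     return included + lo
-- ===== Notes on version B (the rewrite author's own statement) =====
-- stated objective: alternative
-- what changed: Replaces A's greedy running-sum scan over the abs-sorted negatives with a single-pass partition into scalar counters, a descending value sort, a prefix-sum array and a binary search for the cutoff index where net + prefix[i] stops being positive.
import Mathlib
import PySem

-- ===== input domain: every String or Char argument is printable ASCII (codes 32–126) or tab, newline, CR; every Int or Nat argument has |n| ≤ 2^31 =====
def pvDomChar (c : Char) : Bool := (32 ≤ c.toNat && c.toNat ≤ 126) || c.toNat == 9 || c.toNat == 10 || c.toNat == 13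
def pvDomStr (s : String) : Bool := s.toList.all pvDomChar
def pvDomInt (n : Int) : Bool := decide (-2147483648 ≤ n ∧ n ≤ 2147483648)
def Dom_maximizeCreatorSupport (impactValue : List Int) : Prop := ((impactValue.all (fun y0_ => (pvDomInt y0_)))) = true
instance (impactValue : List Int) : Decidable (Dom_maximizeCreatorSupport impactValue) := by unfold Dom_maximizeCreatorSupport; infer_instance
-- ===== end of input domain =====

-- B replaces A's greedy running-sum scan over abs-sorted negatives with scalar one-pass
-- counters, a descending sort, prefix sums and a binary search for the cutoff (alternative
-- decomposition, same asymptotic cost).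


-- ===== PORT A =====
-- the body of A's partitioning for-loop (state: positives, negatives, zeros_count)
def stepA (acc : List Int × List Int × Int) (v : Int) : List Int × List Int × Int :=
  if v > 0 then (acc.1 ++ [v], acc.2.1, acc.2.2)
  else if v < 0 then (acc.1, acc.2.1 ++ [v], acc.2.2)
  else (acc.1, acc.2.1, acc.2.2 + 1)

-- the greedy for-loop over the sorted negatives (break = return count)
def loopA : List Int → Int → Int → Int
  | [], _, count => count
  | neg :: rest, net, count =>
    if net + neg > 0 then loopA rest (net + neg) (count + 1) else count

def maximizeCreatorSupport (impactValue : List Int) : Int :=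
  let st := impactValue.foldl stepA ([], [], 0)
  let positives := st.1
  let negatives := st.2.1
  let zerosCount := st.2.2
  let netImpact := positives.sum
  let count : Int := positives.length
  let count := if netImpact > 0 then count + zerosCount else count
  let negSorted := PySem.List.sorted negatives (fun x => |x|)
  loopA negSorted netImpact count

-- ===== PORT B =====
-- the body of B's partitioning for-loop (state: net, included, zeros, negatives)
def stepB (acc : Int × Int × Int × List Int) (v : Int) : Int × Int × Int × List Int :=
  if v > 0 then (acc.1 + v, acc.2.1 + 1, acc.2.2.1, acc.2.2.2)
  else if v < 0 then (acc.1, acc.2.1, acc.2.2.1, acc.2.2.2 ++ [v])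
  else (acc.1, acc.2.1, acc.2.2.1 + 1, acc.2.2.2)

-- the body of B's prefix-sum for-loop (state: prefix, running)
def pfxStep (acc : List Int × Int) (v : Int) : List Int × Int :=
  (acc.1 ++ [acc.2 + v], acc.2 + v)

-- the while lo < hi binary search; prefix[mid] is always in range (lo ≤ mid < hi ≤ len),
-- so getD is exact here; fuel = hi - lo bounds the iteration count (each step shrinks
-- hi - lo), making the loop structurally recursive
def bsearchGo (pfx : List Int) (net : Int) : Nat → Nat → Nat → Nat
  | 0, lo, _ => lo
  | fuel + 1, lo, hi =>
    if lo < hi then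
      let mid := (lo + hi) / 2
      if 0 < net + pfx.getD mid 0 then bsearchGo pfx net fuel (mid + 1) hi
      else bsearchGo pfx net fuel lo mid
    else lo

def bsearchB (pfx : List Int) (net : Int) (lo hi : Nat) : Nat :=
  bsearchGo pfx net (hi - lo) lo hi

def maximizeCreatorSupport_alt (impactValue : List Int) : Int :=
  let st := impactValue.foldl stepB (0, 0, 0, [])
  let net := st.1
  let included := st.2.1
  let zeros := st.2.2.1
  let negatives := st.2.2.2
  let included := if net > 0 then included + zeros else included
  let negSorted := PySem.List.sorted negatives (fun x => x) true
  let pfx := (negSorted.foldl pfxStep ([], 0)).1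
  included + (bsearchB pfx net 0 pfx.length : Int)

-- ===== PRECONDITION & SPEC =====
def Spec_maximizeCreatorSupport (impactValue : List Int) (out : Int) : Prop := out = maximizeCreatorSupport_alt impactValue
instance (impactValue : List Int) (out : Int) : Decidable (Spec_maximizeCreatorSupport impactValue out) := by unfold Spec_maximizeCreatorSupport; infer_instance

-- ===== CLAIM (what is proved, stated in full; the proofs are below) =====
def Claim_equal_maximizeCreatorSupport : Prop := ∀ (impactValue : List Int), Dom_maximizeCreatorSupport impactValue → Spec_maximizeCreatorSupport impactValue (maximizeCreatorSupport impactValue)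

-- ===== LEMMAS AND PROOFS =====

-- how many negatives A's greedy loop includes
def gcount : List Int → Int → Nat
  | [], _ => 0
  | v :: t, net => if 0 < net + v then gcount t (net + v) + 1 else 0

lemma loopA_eq_gcount : ∀ (s : List Int) (net count : Int),
    loopA s net count = count + (gcount s net : Int) := by
  intro s
  induction s with
  | nil => intro net count; simp [loopA, gcount]
  | cons v t ih =>
      intro net count
      simp only [loopA, gcount]
      by_cases h : 0 < net + v
      · simp only [if_pos h, ih]
        push_cast; ring
      · simp only [if_neg h]
        simp

-- prefix sums of s starting from running value r
def pfxFrom : List Int → Int → List Int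
  | [], _ => []
  | v :: t, r => (r + v) :: pfxFrom t (r + v)

lemma foldl_pfxStep : ∀ (s : List Int) (p0 : List Int) (r : Int),
    s.foldl pfxStep (p0, r) = (p0 ++ pfxFrom s r, r + s.sum) := by
  intro s
  induction s with
  | nil => intro p0 r; simp [pfxFrom]
  | cons v t ih =>
      intro p0 r
      simp only [List.foldl_cons, pfxStep, pfxFrom, ih, List.sum_cons]
      rw [Prod.mk.injEq]
      exact ⟨by simp, by ring⟩

lemma pfxFrom_length : ∀ (s : List Int) (r : Int), (pfxFrom s r).length = s.length := by
  intro s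
  induction s with
  | nil => intro r; rfl
  | cons v t ih => intro r; simp [pfxFrom, ih]

lemma pfxFrom_shift : ∀ (s : List Int) (r : Int), pfxFrom s r = (pfxFrom s 0).map (r + ·) := by
  intro s
  induction s with
  | nil => intro r; rfl
  | cons v t ih =>
      intro r
      simp only [pfxFrom, List.map_cons, zero_add]
      congr 1
      rw [ih (r + v), ih v, List.map_map]
      congr 1
      funext x
      simp; ring

lemma getD_map_add (l : List Int) (c : Int) (i : Nat) (h : i < l.length) :
    (l.map (c + ·)).getD i 0 = c + l.getD i 0 := by
  rw [List.getD_eq_getElem?_getD, List.getD_eq_getElem?_getD, List.getElem?_map,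
      List.getElem?_eq_getElem h]
  simp

lemma pfxFrom_neg : ∀ (s : List Int), (∀ x ∈ s, x < 0) →
    ∀ i, i < s.length → (pfxFrom s 0).getD i 0 < 0 := by
  intro s
  induction s with
  | nil => intro _ i hi; simp at hi
  | cons v t ih =>
      intro h i hi
      have hv : v < 0 := h v (by simp)
      have ht : ∀ x ∈ t, x < 0 := fun x hx => h x (by simp [hx])
      cases i with
      | zero => simp [pfxFrom]; omega
      | succ j =>
          have hj : j < t.length := by simpa [pfxFrom] using hi
          simp only [pfxFrom, zero_add, List.getD_cons_succ]
          rw [pfxFrom_shift t v,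
              getD_map_add (pfxFrom t 0) v j (by rw [pfxFrom_length]; exact hj)]
          have := ih ht j hj
          omega

lemma key_iff : ∀ (s : List Int), (∀ x ∈ s, x < 0) → ∀ (net : Int) (i : Nat), i < s.length →
    (0 < net + (pfxFrom s 0).getD i 0 ↔ i < gcount s net) := by
  intro s
  induction s with
  | nil => intro _ net i hi; simp at hi
  | cons v t ih =>
      intro h net i hi
      have hv : v < 0 := h v (by simp)
      have ht : ∀ x ∈ t, x < 0 := fun x hx => h x (by simp [hx])
      cases i with
      | zero =>
          simp only [pfxFrom, zero_add, List.getD_cons_zero, gcount]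
          split_ifs with hp <;> omega
      | succ j =>
          have hj : j < t.length := by simpa [pfxFrom] using hi
          simp only [pfxFrom, zero_add, List.getD_cons_succ, gcount]
          rw [pfxFrom_shift t v,
              getD_map_add (pfxFrom t 0) v j (by rw [pfxFrom_length]; exact hj)]
          split_ifs with hp
          · rw [← add_assoc, ih ht (net + v) j hj]
            omega
          · have hneg := pfxFrom_neg t ht j hj
            constructor
            · intro hx; omega
            · intro hx; omega

lemma gcount_le_length : ∀ (s : List Int) (net : Int), gcount s net ≤ s.length := by
  intro s
  induction s with
  | nil => intro net; simp [gcount]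
  | cons v t ih =>
      intro net
      simp only [gcount, List.length_cons]
      split_ifs
      · exact Nat.succ_le_succ (ih _)
      · omega

lemma bsearch_eq (pfx : List Int) (net : Int) (k : Nat)
    (h1 : ∀ i, i < k → 0 < net + pfx.getD i 0)
    (h2 : ∀ i, k ≤ i → i < pfx.length → ¬ 0 < net + pfx.getD i 0) :
    ∀ (d lo hi : Nat), hi - lo ≤ d → lo ≤ k → k ≤ hi → hi ≤ pfx.length →
      bsearchGo pfx net d lo hi = k := by
  intro d
  induction d with
  | zero =>
      intro lo hi hd hlk hkh hhn
      simp only [bsearchGo]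
      omega
  | succ d ih =>
      intro lo hi hd hlk hkh hhn
      simp only [bsearchGo]
      by_cases h : lo < hi
      · simp only [if_pos h]
        have hmid1 : lo ≤ (lo + hi) / 2 := by omega
        have hmid2 : (lo + hi) / 2 < hi := by omega
        by_cases hp : 0 < net + pfx.getD ((lo + hi) / 2) 0
        · simp only [if_pos hp]
          have hk : (lo + hi) / 2 < k := by
            by_contra hh
            exact h2 _ (by omega) (by omega) hp
          exact ih _ hi (by omega) (by omega) hkh hhn
        · simp only [if_neg hp]
          have hk : k ≤ (lo + hi) / 2 := by
            by_contra hh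
            exact hp (h1 _ (by omega))
          exact ih lo _ (by omega) hlk hk (by omega)
      · simp only [if_neg h]; omega

-- the two sorts coincide on lists of strictly negative ints
lemma insertBy_abs_eq_rev (x : Int) (hx : x < 0) : ∀ (acc : List Int), (∀ y ∈ acc, y < 0) →
    PySem.List.insertBy (fun a b => decide (|a| < |b|)) x acc
      = PySem.List.insertBy (fun a b => decide ((b : Int) < a)) x acc := by
  intro acc
  induction acc with
  | nil => intro _; rfl
  | cons y ys ih =>
      intro h
      have hy : y < 0 := h y (by simp)
      have hys : ∀ z ∈ ys, z < 0 := fun z hz => h z (by simp [hz])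
      simp only [PySem.List.insertBy]
      have hb : decide (|x| < |y|) = decide (y < x) :=
        decide_eq_decide.mpr (by rw [abs_of_neg hx, abs_of_neg hy]; omega)
      simp only [hb, ih hys]

lemma sorted_abs_eq_sorted_rev : ∀ (ns : List Int), (∀ x ∈ ns, x < 0) →
    PySem.List.sorted ns (fun x => |x|) = PySem.List.sorted ns (fun x => x) true := by
  intro ns hns
  rw [PySem.List.sorted_eq_foldl_insertBy, PySem.List.sorted_rev_eq_foldl_insertBy]
  suffices h : ∀ (l : List Int), (∀ x ∈ l, x < 0) → ∀ (acc : List Int), (∀ y ∈ acc, y < 0) →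
      l.foldl (fun acc x => PySem.List.insertBy (fun a b => decide (|a| < |b|)) x acc) acc
        = l.foldl (fun acc x => PySem.List.insertBy (fun a b => decide ((b : Int) < a)) x acc) acc by
    exact h ns hns [] (by simp)
  intro l
  induction l with
  | nil => intro _ acc _; rfl
  | cons v t ih =>
      intro h acc hacc
      have hv : v < 0 := h v (by simp)
      have ht : ∀ x ∈ t, x < 0 := fun x hx => h x (by simp [hx])
      simp only [List.foldl_cons]
      rw [insertBy_abs_eq_rev v hv acc hacc]
      exact ih ht _ (by
        intro y hy
        rcases (PySem.List.mem_insertBy _ _ _ _).1 hy with h' | h'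
        · omega
        · exact hacc y h')

-- the two partitioning folds compute matching data
lemma partition_rel : ∀ (xs ps ns : List Int) (z : Int),
    xs.foldl stepB (ps.sum, (ps.length : Int), z, ns)
      = ((xs.foldl stepA (ps, ns, z)).1.sum, ((xs.foldl stepA (ps, ns, z)).1.length : Int),
         (xs.foldl stepA (ps, ns, z)).2.2, (xs.foldl stepA (ps, ns, z)).2.1) := by
  intro xs
  induction xs with
  | nil => intro ps ns z; rfl
  | cons v t ih =>
      intro ps ns z
      simp only [List.foldl_cons, stepA, stepB]
      by_cases h1 : v > 0
      · simp only [if_pos h1]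
        have := ih (ps ++ [v]) ns z
        simpa using this
      · simp only [if_neg h1]
        by_cases h2 : v < 0
        · simp only [if_pos h2]
          exact ih ps (ns ++ [v]) z
        · simp only [if_neg h2]
          exact ih ps ns (z + 1)

lemma negatives_neg : ∀ (xs ps ns : List Int) (z : Int), (∀ x ∈ ns, x < 0) →
    ∀ y ∈ (xs.foldl stepA (ps, ns, z)).2.1, y < 0 := by
  intro xs
  induction xs with
  | nil => intro ps ns z h; exact h
  | cons v t ih =>
      intro ps ns z h
      simp only [List.foldl_cons, stepA]
      by_cases h1 : v > 0
      · simp only [if_pos h1]; exact ih _ _ _ h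
      · simp only [if_neg h1]
        by_cases h2 : v < 0
        · simp only [if_pos h2]
          exact ih _ _ _ (by
            intro y hy
            rcases List.mem_append.1 hy with hy | hy
            · exact h y hy
            · simp at hy; omega)
        · simp only [if_neg h2]; exact ih _ _ _ h

-- ===== VERDICT (by name: the statement is the Claim_ definition above) =====
theorem maximizeCreatorSupport_spec : Claim_equal_maximizeCreatorSupport := by
  intro xs _
  show maximizeCreatorSupport xs = maximizeCreatorSupport_alt xs
  simp only [maximizeCreatorSupport, maximizeCreatorSupport_alt]
  have hpart := partition_rel xs [] [] 0
  simp only [List.sum_nil, List.length_nil, Nat.cast_zero] at hpart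
  rw [hpart]
  set a := xs.foldl stepA ([], [], 0) with ha
  have hneg : ∀ y ∈ a.2.1, y < 0 := negatives_neg xs [] [] 0 (by simp)
  have hsort := sorted_abs_eq_sorted_rev a.2.1 hneg
  rw [← hsort]
  set S := PySem.List.sorted a.2.1 (fun x => |x|) with hS
  have hSneg : ∀ x ∈ S, x < 0 := by
    intro x hx
    exact hneg x ((PySem.List.mem_sorted _ _ _ _).1 hx)
  rw [foldl_pfxStep S [] 0]
  simp only [List.nil_append]
  set net := a.1.sum with hnet
  set k := gcount S net with hk
  have hkl : k ≤ S.length := gcount_le_length S net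
  have hlen : (pfxFrom S 0).length = S.length := pfxFrom_length S 0
  have hbs : bsearchB (pfxFrom S 0) net 0 (pfxFrom S 0).length = k :=
    bsearch_eq (pfxFrom S 0) net k
      (fun i hi => (key_iff S hSneg net i (by omega)).2 hi)
      (fun i hik hil hp => by
        have := (key_iff S hSneg net i (by omega)).1 hp
        omega)
      ((pfxFrom S 0).length - 0) 0 (pfxFrom S 0).length (by omega) (by omega) (by omega) (by omega)
  rw [hbs, loopA_eq_gcount]
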